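-- pv_equiv track=rewrite | github.com/cabaleirog/coding-challenges | hacker_rank/day_of_the_programmer.py | day_of_the_programmer
-- ===== SOURCE A (Python) =====
-- from enum import Enum
--
-- DAY_OF_THE_PROGRAMMER = 256
--
-- class Calendar(Enum):
--     JULIAN = 1
--     GREGORIAN = 2
--     TRANSITION = 3
--
-- def day_of_the_programmer(year):
--     """Return the formatted date of the programmer for a given year.
--
--     Args:
--         year (int): The requested year
--
--     Returns:
--         str: Formatted date
--
--     Example:
--         >>> day_of_the_programmer(2000)
--         '12.09.2000'
--     """
--     calendar = which_calendary(year)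
--     is_leap = is_leap_year(year, calendar)
--     days_by_month = days_array(is_leap, calendar)
--
--     count = 0
--     for idx, days in enumerate(days_by_month):
--         count += days
--         diff = DAY_OF_THE_PROGRAMMER - count
--         if diff <= days_by_month[idx + 1]:
--             month = (idx + 1) + 1  # Next month index + 1 to convert it to 1-12
--             day = diff
--             break
--
--     return '{:02}.{:02}.{}'.format(day, month, year)
--
-- def days_array(leap_year, calendar):
--     """Get the number of days on each month.
--
--     Args:
--         leap_year (bool): Is the requested year a leap year
--         calendar (int): Which calendar to use
--
--     Returns:
--         list[int]: An array containing the number of days on each month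
--     """
--     months_with_31_days = [1, 3, 5, 7, 8, 10, 12]
--     months_with_30_days = [4, 6, 9, 11]
--     days = [0] * 12
--
--     for month in months_with_31_days:
--         days[month - 1] = 31
--     for month in months_with_30_days:
--         days[month - 1] = 30
--
--     days[1] = 29 if leap_year else 28  # Index 0 is Jan., Index 1 is Feb.
--     if calendar == Calendar.TRANSITION:
--         days[1] -= 13  # Feb. 1 to 13 were skipped on that year.
--
--     return days
--
-- def which_calendary(year):
--     """Get the calendar used on a particular year.
--
--     Args:
--         year (int): Requested year
--
--     Raises:
--         ValueError: If the year is out of the problem's specifications.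
--
--     Returns:
--         int: Calendar used on that year
--     """
--     if year >= 1700 and year <= 1917:
--         return Calendar.JULIAN
--     elif year >= 1919 and year <= 2700:
--         return Calendar.GREGORIAN
--     elif year == 1918:
--         return Calendar.TRANSITION
--     else:
--         raise ValueError('Year must be between 1700 and 2700.')
--
-- def is_leap_year(year, calendar=Calendar.JULIAN):
--     """Check if `year` is a leap year.
--
--     Args:
--         year (int): Requested year
--         calendar (int, optional): Which alendar to use
--
--     Returns:
--         bool: True if it is a leap year, False otherwise
--     """
--     if calendar == Calendar.JULIAN:
--         return year % 4 == 0
--     return year % 400 == 0 or (year % 4 == 0 and year % 100 != 0)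
-- ===== SOURCE B (Python) =====
-- def day_of_the_programmer(year):
--     """Return the formatted date of the programmer (256th day) for a given year.
--
--     Closed form: the 256th day always falls in September; only February's
--     length varies (28/29, or 15 in the 1918 transition year).
--     """
--     if year < 1700 or year > 2700:
--         raise ValueError('Year must be between 1700 and 2700.')
--     if year == 1918:
--         feb = 15
--     elif year <= 1917:
--         feb = 29 if year % 4 == 0 else 28
--     else:
--         feb = 29 if (year % 400 == 0 or (year % 4 == 0 and year % 100 != 0)) else 28
--     # days in Jan..Aug excluding February: 31+31+30+31+30+31+31 = 215
--     day = 256 - (215 + feb)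
--     return '{:02}.{:02}.{}'.format(day, 9, year)
-- ===== Notes on version B (the rewrite author's own statement) =====
-- stated objective: simpler
-- what changed: Replaces the month-array construction and the cumulative enumerate/break scan with a closed-form computation: only February's length varies, so day = 256 - (215 + feb) and month is always September.
import Mathlib
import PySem

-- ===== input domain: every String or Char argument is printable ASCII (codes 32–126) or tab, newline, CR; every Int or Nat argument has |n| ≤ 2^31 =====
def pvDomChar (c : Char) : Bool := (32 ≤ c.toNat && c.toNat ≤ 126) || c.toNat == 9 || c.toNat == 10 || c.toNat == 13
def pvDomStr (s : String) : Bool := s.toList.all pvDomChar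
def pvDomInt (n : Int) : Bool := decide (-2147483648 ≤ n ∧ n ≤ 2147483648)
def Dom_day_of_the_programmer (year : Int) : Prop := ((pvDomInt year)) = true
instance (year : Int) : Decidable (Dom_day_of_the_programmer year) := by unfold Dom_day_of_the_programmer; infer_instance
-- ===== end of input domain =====

-- B replaces A's month-array build and cumulative scan by a closed form (256th day is in September); equivalence of return values on 1700–2700 (A raises ValueError outside, excluded by Pre_).

-- ===== PORT A =====
inductive Cal
  | julian | gregorian | transition
deriving DecidableEq

-- which_calendary; none = ValueError (excluded by Pre_)
def whichCalendaryA (year : Int) : Option Cal :=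
  if year ≥ 1700 ∧ year ≤ 1917 then some Cal.julian
  else if year ≥ 1919 ∧ year ≤ 2700 then some Cal.gregorian
  else if year = 1918 then some Cal.transition
  else none

def isLeapYearA (year : Int) (calendar : Cal) : Bool :=
  if calendar = Cal.julian then PySem.Int.mod year 4 = 0
  else PySem.Int.mod year 400 = 0 ∨ (PySem.Int.mod year 4 = 0 ∧ PySem.Int.mod year 100 ≠ 0)

def daysArrayA (leap_year : Bool) (calendar : Cal) : List Int :=
  let days := List.replicate 12 (0 : Int)
  -- for month in months_with_31_days: days[month-1] = 31  (indices are literal and in range)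
  let days := [1, 3, 5, 7, 8, 10, 12].foldl (fun d (m : Nat) => d.set (m - 1) 31) days
  let days := [4, 6, 9, 11].foldl (fun d (m : Nat) => d.set (m - 1) 30) days
  let days := days.set 1 (if leap_year then 29 else 28)
  if calendar = Cal.transition then days.set 1 ((days[1]?.getD 0) - 13) else days

-- the 'for idx, days in enumerate(days_by_month)' loop; none = no break / IndexError (unreachable on Pre_)
def loopA (all : List Int) : List (Int × Int) → Int → Option (Int × Int)
  | [], _ => none
  | (idx, d) :: rest, count =>
      let count := count + d
      let diff := 256 - count
      match PySem.List.pyGet? all (idx + 1) with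
      | none => none
      | some nxt => if diff ≤ nxt then some (diff, idx + 1 + 1) else loopA all rest count

-- '{:02}'.format(n) (exact: negative n already has width ≥ 2 here only for n ≤ -1, matching Python's no-pad)
def fmt02 (n : Int) : String :=
  if 0 ≤ n ∧ n < 10 then "0" ++ PySem.Int.toStr n else PySem.Int.toStr n

def day_of_the_programmer (year : Int) : String :=
  match whichCalendaryA year with
  | none => ""  -- ValueError; outside Pre_
  | some calendar =>
    let is_leap := isLeapYearA year calendar
    let days_by_month := daysArrayA is_leap calendar
    match loopA days_by_month (PySem.List.enumerate days_by_month 0) 0 with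
    | none => ""  -- unreachable on Pre_
    | some (day, month) => fmt02 day ++ "." ++ fmt02 month ++ "." ++ PySem.Int.toStr year

-- ===== PORT B =====
def day_of_the_programmer_alt (year : Int) : String :=
  if year < 1700 ∨ year > 2700 then ""  -- ValueError; outside Pre_
  else
    let feb : Int :=
      if year = 1918 then 15
      else if year ≤ 1917 then (if PySem.Int.mod year 4 = 0 then 29 else 28)
      else (if PySem.Int.mod year 400 = 0 ∨ (PySem.Int.mod year 4 = 0 ∧ PySem.Int.mod year 100 ≠ 0) then 29 else 28)
    let day := 256 - (215 + feb)
    fmt02 day ++ "." ++ fmt02 9 ++ "." ++ PySem.Int.toStr year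

-- ===== PRECONDITION & SPEC =====
-- A raises ValueError outside 1700..2700; exactly those inputs are excluded.
def Pre_day_of_the_programmer (year : Int) : Prop := 1700 ≤ year ∧ year ≤ 2700
instance (year : Int) : Decidable (Pre_day_of_the_programmer year) := by unfold Pre_day_of_the_programmer; infer_instance
def pvWitness_day_of_the_programmer : Int := (2000)

def Spec_day_of_the_programmer (year : Int) (out : String) : Prop := out = day_of_the_programmer_alt year
instance (year : Int) (out : String) : Decidable (Spec_day_of_the_programmer year out) := by unfold Spec_day_of_the_programmer; infer_instance

-- ===== CLAIM (what is proved, stated in full; the proofs are below) =====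
def Claim_equal_day_of_the_programmer : Prop := ∀ (year : Int), Dom_day_of_the_programmer year → Pre_day_of_the_programmer year → Spec_day_of_the_programmer year (day_of_the_programmer year)

-- ===== LEMMAS AND PROOFS =====

-- With the calendar and leap flag fixed, A's whole pipeline reduces to a literal day/month.
theorem dotp_pipeline (year : Int) (cal : Cal) (hc : whichCalendaryA year = some cal)
    (b : Bool) (hb : isLeapYearA year cal = b) :
    day_of_the_programmer year =
      fmt02 (256 - (215 + ((if b then (29:Int) else 28) - if cal = Cal.transition then 13 else 0))) ++ "." ++ fmt02 9 ++ "." ++ PySem.Int.toStr year := by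
  unfold day_of_the_programmer
  rw [hc]
  simp only [hb]
  cases cal <;> cases b <;> rfl

-- ===== VERDICT (by name: the statement is the Claim_ definition above) =====
theorem day_of_the_programmer_spec : Claim_equal_day_of_the_programmer := by
  intro year _ hpre
  obtain ⟨h1, h2⟩ := hpre
  unfold Spec_day_of_the_programmer day_of_the_programmer_alt
  rw [if_neg (by omega)]
  by_cases h18 : year = 1918
  · subst h18
    rw [dotp_pipeline 1918 Cal.transition rfl false rfl]
    rfl
  · by_cases hj : year ≤ 1917
    · have hc : whichCalendaryA year = some Cal.julian := by
        unfold whichCalendaryA; rw [if_pos ⟨h1, hj⟩]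
      by_cases hl : (4 : Int) ∣ year
      · rw [dotp_pipeline year Cal.julian hc true
          (by simp [isLeapYearA, hl])]
        simp [if_neg h18, if_pos hj, hl]
      · rw [dotp_pipeline year Cal.julian hc false
          (by simp [isLeapYearA, hl])]
        simp [if_neg h18, if_pos hj, hl]
    · have hc : whichCalendaryA year = some Cal.gregorian := by
        unfold whichCalendaryA
        rw [if_neg (by omega), if_pos ⟨by omega, h2⟩]
      by_cases hl : (400 : Int) ∣ year ∨ ((4 : Int) ∣ year ∧ ¬ (100 : Int) ∣ year)
      · rw [dotp_pipeline year Cal.gregorian hc true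
          (by simp [isLeapYearA]; tauto)]
        simp [if_neg h18, if_neg hj, hl]
      · rw [dotp_pipeline year Cal.gregorian hc false
          (by simp [isLeapYearA]; tauto)]
        simp [if_neg h18, if_neg hj, hl]
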